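-- pv_equiv track=rewrite | github.com/marvlabs/adventofcode | 2015/2015_05.py | find_nice_p1
-- ===== SOURCE A (Python) =====
-- def check_vowels(s) :
--     '''Check: It contains at least three vowels (aeiou only), like aei, xazegov, or aeiouaeiouaeiou.'''
--     return  len([l for l in s if l in "aeiou"]) >= 3
--
-- def check_twice(s) :
--     '''Check: It contains at least one letter that appears twice in a row, like xx, abcdde (dd), or aabbccdd (aa, bb, cc, or dd).'''
--     last_c = ''
--     for c in s :
--         if c == last_c :
--             return True
--         last_c = c
--     return False
--
-- def check_no_bad(s) :
--     '''Check: It does not contain the strings ab, cd, pq, or xy, even if they are part of one of the other requirements.'''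
--     for bad in ('ab', 'cd', 'pq', 'xy') :
--         if (s.find(bad) >= 0) :
--             return False
--     return True
--
-- def find_nice_p1(aoc_input):
--     nr_nice = 0
--     for string in aoc_input.splitlines() :
--         if string == '' :
--             continue
--         if (check_vowels(string)  and check_twice(string) and check_no_bad(string)) :
--             nr_nice += 1
--     return nr_nice
-- ===== SOURCE B (Python) =====
-- def find_nice_p1(aoc_input):
--     nr_nice = 0
--     for line in aoc_input.splitlines():
--         if line == '':
--             continue
--         vowels = 0
--         has_double = False
--         has_bad = False
--         prev = None
--         for c in line:
--             if c in "aeiou":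
--                 vowels += 1
--             if prev is not None:
--                 if c == prev:
--                     has_double = True
--                 if prev + c in ("ab", "cd", "pq", "xy"):
--                     has_bad = True
--             prev = c
--         if vowels >= 3 and has_double and not has_bad:
--             nr_nice += 1
--     return nr_nice
-- ===== Notes on version B (the rewrite author's own statement) =====
-- stated objective: faster
-- what changed: Replaces A's three separate scans per line (a vowel filter, a doubled-letter loop, and four full substring searches via str.find) with one single pass per line that maintains a vowel counter, a has_double flag and a has_bad flag keyed on the previous character.
import Mathlib
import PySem

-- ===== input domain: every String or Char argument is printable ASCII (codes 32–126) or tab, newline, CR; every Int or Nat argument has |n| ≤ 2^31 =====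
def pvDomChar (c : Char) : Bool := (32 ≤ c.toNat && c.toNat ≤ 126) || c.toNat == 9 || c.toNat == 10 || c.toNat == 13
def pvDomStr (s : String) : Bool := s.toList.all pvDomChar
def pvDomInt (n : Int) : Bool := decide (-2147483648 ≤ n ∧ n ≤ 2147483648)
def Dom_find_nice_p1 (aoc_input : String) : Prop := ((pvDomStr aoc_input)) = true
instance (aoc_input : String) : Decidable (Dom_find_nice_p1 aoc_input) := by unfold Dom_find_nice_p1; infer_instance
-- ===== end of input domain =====

-- B replaces A's three separate scans per non-empty line by one single pass keeping a
-- vowel counter, a doubled-letter flag and a bad-pair flag (objective: faster, constant factor).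

-- ===== PORT A =====
def check_vowels (s : List Char) : Bool :=
  decide (3 ≤ (s.filter (fun l => PySem.Chars.isIn [l] ("aeiou".toList))).length)

def check_twice_go (last : List Char) : List Char → Bool
  | [] => false
  | c :: rest => if [c] = last then true else check_twice_go [c] rest

def check_twice (s : List Char) : Bool := check_twice_go [] s

def check_no_bad_go (s : List Char) : List (List Char) → Bool
  | [] => true
  | bad :: rest => if 0 ≤ PySem.Chars.find s bad then false else check_no_bad_go s rest

def check_no_bad (s : List Char) : Bool :=
  check_no_bad_go s ["ab".toList, "cd".toList, "pq".toList, "xy".toList]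

def find_nice_p1 (aoc_input : String) : Int :=
  (PySem.Str.splitlines aoc_input).foldl (fun nr_nice s =>
    if s == "" then nr_nice
    else if check_vowels s.toList && check_twice s.toList && check_no_bad s.toList then
      nr_nice + 1
    else nr_nice) 0

-- ===== PORT B =====
def pvNiceGo (v : Int) (d b : Bool) (prev : Option Char) : List Char → Int × Bool × Bool
  | [] => (v, d, b)
  | c :: rest =>
    let v' := if PySem.Chars.isIn [c] ("aeiou".toList) then v + 1 else v
    let d' := match prev with
      | some p => if c == p then true else d
      | none => d
    let b' := match prev with
      | some p => if [p, c] ∈ [['a','b'], ['c','d'], ['p','q'], ['x','y']] then true else b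
      | none => b
    pvNiceGo v' d' b' (some c) rest

def find_nice_p1_alt (aoc_input : String) : Int :=
  (PySem.Str.splitlines aoc_input).foldl (fun nr_nice line =>
    if line == "" then nr_nice
    else
      let r := pvNiceGo 0 false false none line.toList
      if decide (3 ≤ r.1) && r.2.1 && !r.2.2 then nr_nice + 1 else nr_nice) 0

-- ===== PRECONDITION & SPEC =====
def Spec_find_nice_p1 (aoc_input : String) (out : Int) : Prop := out = find_nice_p1_alt aoc_input
instance (aoc_input : String) (out : Int) : Decidable (Spec_find_nice_p1 aoc_input out) := by unfold Spec_find_nice_p1; infer_instance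

-- ===== CLAIM (what is proved, stated in full; the proofs are below) =====
def Claim_equal_find_nice_p1 : Prop := ∀ (aoc_input : String), Dom_find_nice_p1 aoc_input → Spec_find_nice_p1 aoc_input (find_nice_p1 aoc_input)

-- ===== LEMMAS AND PROOFS =====

-- number of vowels in a list of chars (the predicate is the one both ports use)
def pvVcnt (s : List Char) : Nat := s.countP (fun l => PySem.Chars.isIn [l] ("aeiou".toList))

-- some char equals its predecessor, the first predecessor being p
def pvAdjEq : Char → List Char → Bool
  | _, [] => false
  | p, c :: t => (c == p) || pvAdjEq c t

-- some adjacent pair (with first predecessor p) is a bad pair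
def pvAdjBad : Char → List Char → Bool
  | _, [] => false
  | p, c :: t => (decide ([p, c] ∈ [['a','b'], ['c','d'], ['p','q'], ['x','y']])) || pvAdjBad c t

-- the two-char word x y occurs at adjacent positions
def pvPair (x y : Char) : List Char → Bool
  | c1 :: c2 :: t => (c1 == x && c2 == y) || pvPair x y (c2 :: t)
  | _ => false

theorem pvNiceGo_some (s : List Char) : ∀ (v : Int) (d b : Bool) (p : Char),
    pvNiceGo v d b (some p) s = (v + (pvVcnt s : Int), d || pvAdjEq p s, b || pvAdjBad p s) := by
  induction s with
  | nil => intro v d b p; simp [pvNiceGo, pvVcnt, pvAdjEq, pvAdjBad]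
  | cons c t ih =>
    intro v d b p
    simp only [pvNiceGo, ih]
    refine Prod.ext ?_ (Prod.ext ?_ ?_)
    · simp only [pvVcnt, List.countP_cons]
      split_ifs <;> push_cast <;> omega
    · simp only [pvAdjEq]
      by_cases h : (c == p) = true <;> simp [h]
    · simp only [pvAdjBad]
      by_cases h : [p, c] ∈ [['a','b'], ['c','d'], ['p','q'], ['x','y']] <;> simp [h]

theorem pvCheck_twice_go (s : List Char) : ∀ p : Char, check_twice_go [p] s = pvAdjEq p s := by
  induction s with
  | nil => intro p; rfl
  | cons c t ih =>
    intro p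
    simp only [check_twice_go, pvAdjEq, ih]
    by_cases h : c = p <;> simp [h]

theorem pvPair_isIn (x y : Char) (s : List Char) :
    PySem.Chars.isIn [x, y] s = pvPair x y s := by
  induction s with
  | nil => simp [pvPair, PySem.Chars.isIn_eq_false_iff]
  | cons c t ih =>
    rcases t with _ | ⟨c2, t2⟩
    · rw [Bool.eq_iff_iff]
      constructor
      · intro h
        rw [PySem.Chars.isIn_iff_infix] at h
        rcases h with ⟨pre, suf, habs⟩
        have := congrArg List.length habs
        simp at this
        omega
      · intro h; simp [pvPair] at h
    · rw [Bool.eq_iff_iff, PySem.Chars.isIn_iff_infix, List.infix_cons_iff]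
      show _ ↔ pvPair x y (c :: c2 :: t2) = true
      rw [pvPair, ← ih, Bool.or_eq_true, Bool.and_eq_true, PySem.Chars.isIn_iff_infix]
      constructor
      · rintro (hp | hi)
        · rcases List.cons_prefix_cons.1 hp with ⟨h1, hp2⟩
          rcases List.cons_prefix_cons.1 hp2 with ⟨h2, _⟩
          exact Or.inl ⟨by simp [h1], by simp [h2]⟩
        · exact Or.inr hi
      · rintro (⟨h1, h2⟩ | hi)
        · refine Or.inl ?_
          simp at h1 h2
          subst h1; subst h2
          exact List.cons_prefix_cons.2 ⟨rfl, List.cons_prefix_cons.2 ⟨rfl, List.nil_prefix⟩⟩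
        · exact Or.inr hi

theorem pvAdjBad_pairs (s : List Char) : ∀ p : Char,
    pvAdjBad p s = (pvPair 'a' 'b' (p :: s) || pvPair 'c' 'd' (p :: s) ||
                    pvPair 'p' 'q' (p :: s) || pvPair 'x' 'y' (p :: s)) := by
  induction s with
  | nil => intro p; simp [pvAdjBad, pvPair]
  | cons c t ih =>
    intro p
    simp only [pvAdjBad, ih c]
    show _ = (pvPair 'a' 'b' (p :: c :: t) || pvPair 'c' 'd' (p :: c :: t) ||
              pvPair 'p' 'q' (p :: c :: t) || pvPair 'x' 'y' (p :: c :: t))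
    rw [Bool.eq_iff_iff]
    simp only [pvPair, List.mem_cons, List.cons.injEq, Bool.or_eq_true,
      Bool.and_eq_true, beq_iff_eq, decide_eq_true_eq, List.not_mem_nil, or_false, and_true]
    tauto

theorem pvFind_pair_iff (x y : Char) (s : List Char) :
    (0 ≤ PySem.Chars.find s [x, y]) ↔ pvPair x y s = true := by
  rw [PySem.Chars.find_nonneg_iff, ← PySem.Chars.isIn_iff_infix, pvPair_isIn]

theorem pvCheck_no_bad (s : List Char) :
    check_no_bad s = !(pvPair 'a' 'b' s || pvPair 'c' 'd' s || pvPair 'p' 'q' s || pvPair 'x' 'y' s) := by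
  show check_no_bad_go s _ = _
  simp only [check_no_bad_go]
  by_cases h1 : 0 ≤ PySem.Chars.find s ("ab".toList) <;>
    by_cases h2 : 0 ≤ PySem.Chars.find s ("cd".toList) <;>
      by_cases h3 : 0 ≤ PySem.Chars.find s ("pq".toList) <;>
        by_cases h4 : 0 ≤ PySem.Chars.find s ("xy".toList) <;>
  · rw [show ("ab".toList) = ['a','b'] from rfl] at h1
    rw [show ("cd".toList) = ['c','d'] from rfl] at h2
    rw [show ("pq".toList) = ['p','q'] from rfl] at h3
    rw [show ("xy".toList) = ['x','y'] from rfl] at h4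
    rw [pvFind_pair_iff] at h1 h2 h3 h4
    simp_all [pvFind_pair_iff]

theorem pvLine_eq (line : String) (nr : Int) :
    (if line == "" then nr
     else if check_vowels line.toList && check_twice line.toList && check_no_bad line.toList then
       nr + 1
     else nr)
    = (if line == "" then nr
       else
         let r := pvNiceGo 0 false false none line.toList
         if decide (3 ≤ r.1) && r.2.1 && !r.2.2 then nr + 1 else nr) := by
  by_cases he : line == ""
  · simp [he]
  · simp only [he]
    have hne : line.toList ≠ [] := by
      intro h
      exact he (by simp [show line = "" from String.ext (by simp [h])])
    rcases hl : line.toList with _ | ⟨c, t⟩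
    · exact absurd hl hne
    congr 1
    -- B's state after the first character
    have hB : pvNiceGo 0 false false none (c :: t)
        = pvNiceGo (if PySem.Chars.isIn [c] ("aeiou".toList) then 0 + 1 else 0) false false (some c) t := rfl
    rw [hB, pvNiceGo_some]
    -- A's three checks
    have hv : check_vowels (c :: t)
        = decide (3 ≤ (if PySem.Chars.isIn [c] ("aeiou".toList) then (0:Int) + 1 else 0) + (pvVcnt t : Int)) := by
      simp only [check_vowels]
      rw [← List.countP_eq_length_filter, decide_eq_decide]
      simp only [pvVcnt, List.countP_cons]
      split_ifs <;> push_cast <;> omega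
    have ht : check_twice (c :: t) = pvAdjEq c t := by
      show check_twice_go [] (c :: t) = _
      rw [check_twice_go]
      simp [pvCheck_twice_go]
    rw [hv, ht, pvCheck_no_bad, pvAdjBad_pairs]
    simp

-- ===== VERDICT (by name: the statement is the Claim_ definition above) =====
theorem find_nice_p1_spec : Claim_equal_find_nice_p1 := by
  intro aoc_input _
  unfold Spec_find_nice_p1 find_nice_p1 find_nice_p1_alt
  apply PySem.List.foldl_congr_mem
  intro acc line _
  exact pvLine_eq line acc
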